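-- pv_equiv track=rewrite | github.com/agwaBom/PEMA | parallel_corpus_to_json.py | file_list_to_json
-- ===== SOURCE A (Python) =====
-- def file_list_to_json(file_list):
--     template_start = '{\"input\":\"'
--     template_end = '\"}'
--     processed_file_list = []
--     for file in file_list:
--         if '\\' in file:
--             file = file.replace('\\', '\\\\')
--         if '/' or '"' in file:
--             file = file.replace('/', '\\/')
--             file = file.replace('"', '\\"')
--
--         processed_file_list.append(template_start + file + template_end)
--     return processed_file_list
-- ===== SOURCE B (Python) =====
-- def file_list_to_json(file_list):
--     processed = []
--     for file in file_list:
--         parts = ['{"input":"']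
--         for ch in file:
--             if ch in '\\/"':
--                 parts.append('\\')
--             parts.append(ch)
--         parts.append('"}')
--         processed.append(''.join(parts))
--     return processed
-- ===== Notes on version B (the rewrite author's own statement) =====
-- stated objective: alternative
-- what changed: Instead of A's whole-string substring-replacement passes (three chained .replace scans per string), B escapes by a single explicit character loop that inserts a backslash before each special character into a parts accumulator joined at the end, dropping A's inert truthiness guard.
import Mathlib
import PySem

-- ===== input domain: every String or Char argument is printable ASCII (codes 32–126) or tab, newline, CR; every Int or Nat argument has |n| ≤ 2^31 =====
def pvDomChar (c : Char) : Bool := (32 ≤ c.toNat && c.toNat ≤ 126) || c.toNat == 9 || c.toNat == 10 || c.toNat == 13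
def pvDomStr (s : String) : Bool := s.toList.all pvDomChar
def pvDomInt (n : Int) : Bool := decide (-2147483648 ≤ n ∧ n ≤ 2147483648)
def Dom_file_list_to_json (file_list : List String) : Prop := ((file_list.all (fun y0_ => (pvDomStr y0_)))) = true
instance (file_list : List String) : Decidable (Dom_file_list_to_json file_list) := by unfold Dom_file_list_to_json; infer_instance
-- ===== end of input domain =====

-- B escapes each string by one explicit character loop inserting '\' before the specials into a
-- parts accumulator joined at the end, instead of A's three chained whole-string .replace passes.

-- ===== PORT A =====
def file_list_to_json (file_list : List String) : List String :=
  let template_start : String := "{\"input\":\""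
  let template_end : String := "\"}"
  file_list.foldl (fun processed_file_list file =>
    let file := if PySem.Str.isIn "\\" file then PySem.Str.replace file "\\" "\\\\" else file
    -- Python: `if '/' or '"' in file:` — the nonempty literal '/' is truthy, ported literally
    let file := if ("/" : String) ≠ "" ∨ PySem.Str.isIn "\"" file = true then
        PySem.Str.replace (PySem.Str.replace file "/" "\\/") "\"" "\\\""
      else file
    processed_file_list ++ [template_start ++ file ++ template_end]) []

-- ===== PORT B =====
def file_list_to_json_alt (file_list : List String) : List String :=
  file_list.foldl (fun processed file =>
    let parts : List String := ["{\"input\":\""]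
    -- `ch in '\\/"'` on a single char = membership in the three-character literal
    let parts := file.toList.foldl (fun parts ch =>
      (if ch = '\\' ∨ ch = '/' ∨ ch = '"' then parts ++ ["\\"] else parts)
        ++ [String.ofList [ch]]) parts
    let parts := parts ++ ["\"}"]
    processed ++ [PySem.Str.join "" parts]) []

-- ===== PRECONDITION & SPEC =====
def Spec_file_list_to_json (file_list : List String) (out : List String) : Prop := out = file_list_to_json_alt file_list
instance (file_list : List String) (out : List String) : Decidable (Spec_file_list_to_json file_list out) := by unfold Spec_file_list_to_json; infer_instance

-- ===== CLAIM (what is proved, stated in full; the proofs are below) =====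
def Claim_equal_file_list_to_json : Prop := ∀ (file_list : List String), Dom_file_list_to_json file_list → Spec_file_list_to_json file_list (file_list_to_json file_list)

-- ===== LEMMAS AND PROOFS =====

-- per-character escape: what both programs do to one character, as a List Char
def escPair (c : Char) : List Char := if c = '\\' ∨ c = '/' ∨ c = '"' then ['\\', c] else [c]

-- single-character replacement: s.replace(o, new) is the character-wise map esc1 o new
def esc1 (o : Char) (new : List Char) (c : Char) : List Char := if c = o then new else [c]

theorem go_single (o : Char) (new : List Char) :
    ∀ fuel l acc, l.length ≤ fuel →
      PySem.Chars.replace.go [o] new fuel l acc = acc.reverse ++ l.flatMap (esc1 o new) := by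
  intro fuel
  induction fuel with
  | zero => intro l acc h; simp at h; subst h; simp [PySem.Chars.replace.go]
  | succ n ih =>
    intro l acc h
    cases l with
    | nil => simp [PySem.Chars.replace.go]
    | cons c t =>
      rw [PySem.Chars.replace.go]
      by_cases hc : c = o
      · subst hc
        simp [List.isPrefixOf, ih t _ (by simpa using h), esc1]
      · have : ([o].isPrefixOf (c :: t)) = false := by
          simp [List.isPrefixOf]; exact fun h => absurd h.symm hc
        simp [this, ih t _ (by simpa using h), esc1, hc]

theorem replace_single (o : Char) (new : List Char) (s : List Char) :
    PySem.Chars.replace s [o] new = s.flatMap (esc1 o new) := by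
  rw [PySem.Chars.replace]
  simp [go_single o new s.length s [] (le_refl _)]

-- the three chained single-character escapes of A equal the one-pass per-character escape
theorem chain_eq_table (l : List Char) :
    ((l.flatMap (esc1 '\\' ['\\', '\\'])).flatMap (esc1 '/' ['\\', '/'])).flatMap
        (esc1 '"' ['\\', '"']) = l.flatMap escPair := by
  rw [List.flatMap_assoc, List.flatMap_assoc]
  apply List.flatMap_congr
  intro c _
  by_cases h1 : c = '\\'
  · subst h1; decide
  by_cases h2 : c = '/'
  · subst h2; decide
  by_cases h3 : c = '"'
  · subst h3; decide
  simp [esc1, escPair, h1, h2, h3]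

-- without a backslash the first escape pass is the identity
theorem flatMap_escB_of_not_mem (l : List Char) (h : '\\' ∉ l) :
    l.flatMap (esc1 '\\' ['\\', '\\']) = l := by
  induction l with
  | nil => rfl
  | cons c t ih =>
    simp only [List.mem_cons, not_or] at h
    have hc : c ≠ '\\' := fun e => h.1 e.symm
    simp [esc1, hc, ih h.2]

-- after A's first (guarded) pass the string is exactly the backslash-escape of its chars
theorem stepB_eq (file : String) :
    (if PySem.Str.isIn "\\" file = true then
        String.ofList (PySem.Chars.replace file.toList ("\\" : String).toList ("\\\\" : String).toList)
      else file).toList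
      = file.toList.flatMap (esc1 '\\' ['\\', '\\']) := by
  by_cases h : PySem.Str.isIn "\\" file = true
  · rw [if_pos h, String.toList_ofList,
        show ("\\" : String).toList = ['\\'] from by decide,
        show ("\\\\" : String).toList = ['\\', '\\'] from by decide, replace_single]
  · have hmem : '\\' ∉ file.toList := by
      intro hm
      exact h ((PySem.Str.isIn_iff_infix "\\" file).mpr (by
        simpa using (List.singleton_infix_iff _ _).mpr hm))
    rw [if_neg h, flatMap_escB_of_not_mem _ hmem]

-- A's per-file output, character-wise
theorem a_per_file (file : String) :
    (let f1 := if PySem.Str.isIn "\\" file then PySem.Str.replace file "\\" "\\\\" else file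
     let f2 := if ("/" : String) ≠ "" ∨ PySem.Str.isIn "\"" file = true then
         PySem.Str.replace (PySem.Str.replace f1 "/" "\\/") "\"" "\\\""
       else f1
     (("{\"input\":\"" : String) ++ f2 ++ "\"}").toList)
      = ("{\"input\":\"" : String).toList ++ file.toList.flatMap escPair ++ ("\"}" : String).toList := by
  have hguard : (("/" : String) ≠ "" ∨ PySem.Str.isIn "\"" file = true) := Or.inl (by decide)
  have hmain : (PySem.Str.replace (PySem.Str.replace
        (if PySem.Str.isIn "\\" file then PySem.Str.replace file "\\" "\\\\" else file)
        "/" "\\/") "\"" "\\\"").toList = file.toList.flatMap escPair := by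
    simp only [PySem.Str.replace, String.toList_ofList]
    rw [show ("/" : String).toList = ['/'] from by decide,
        show ("\\/" : String).toList = ['\\', '/'] from by decide,
        show ("\"" : String).toList = ['"'] from by decide,
        show ("\\\"" : String).toList = ['\\', '"'] from by decide,
        replace_single, replace_single, stepB_eq, chain_eq_table]
  simp only [if_pos hguard, String.toList_append, hmain]

-- what one character contributes to B's parts list
def partsOf (ch : Char) : List String :=
  if ch = '\\' ∨ ch = '/' ∨ ch = '"' then ["\\", String.ofList [ch]] else [String.ofList [ch]]

-- B's inner character loop, as an accumulator invariant
theorem inner_parts (l : List Char) (P : List String) :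
    l.foldl (fun parts ch =>
        (if ch = '\\' ∨ ch = '/' ∨ ch = '"' then parts ++ ["\\"] else parts)
          ++ [String.ofList [ch]]) P
      = P ++ l.flatMap partsOf := by
  induction l generalizing P with
  | nil => simp
  | cons c t ih =>
    by_cases h : c = '\\' ∨ c = '/' ∨ c = '"'
    · simp [h, ih, partsOf, List.append_assoc]
    · simp [h, ih, partsOf]

-- ''.join is flatten on the character lists
theorem join_nil_flatten (ps : List (List Char)) : PySem.Chars.join [] ps = ps.flatten := by
  simp only [PySem.Chars.join, List.intercalate]
  induction ps with
  | nil => simp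
  | cons a t ih =>
    cases t with
    | nil => simp
    | cons b t2 =>
        rw [show List.intersperse ([] : List Char) (a :: b :: t2)
              = a :: [] :: List.intersperse [] (b :: t2) from rfl]
        simp [ih]

-- flattening the per-character parts gives the per-character escape
theorem flatten_partsOf (l : List Char) :
    ((l.flatMap partsOf).map String.toList).flatten = l.flatMap escPair := by
  induction l with
  | nil => rfl
  | cons c t ih =>
    by_cases h : c = '\\' ∨ c = '/' ∨ c = '"'
    · simp [partsOf, escPair, h, ih,
        show ("\\" : String).toList = ['\\'] from by decide]
    · simp [partsOf, escPair, h, ih]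

-- B's per-file output, character-wise
theorem b_per_file (file : String) :
    (PySem.Str.join ""
        ((file.toList.foldl (fun parts ch =>
            (if ch = '\\' ∨ ch = '/' ∨ ch = '"' then parts ++ ["\\"] else parts)
              ++ [String.ofList [ch]]) (["{\"input\":\""] : List String)) ++ ["\"}"])).toList
      = ("{\"input\":\"" : String).toList ++ file.toList.flatMap escPair ++ ("\"}" : String).toList := by
  rw [inner_parts, PySem.Str.toList_join,
      show ("" : String).toList = [] from rfl, join_nil_flatten]
  simp [flatten_partsOf]

-- ===== VERDICT (by name: the statement is the Claim_ definition above) =====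
theorem file_list_to_json_spec : Claim_equal_file_list_to_json := by
  intro file_list _
  unfold Spec_file_list_to_json file_list_to_json file_list_to_json_alt
  rw [PySem.List.foldl_append_singleton_eq_map, PySem.List.foldl_append_singleton_eq_map]
  apply List.map_congr_left
  intro file _
  apply String.toList_inj.mp
  rw [b_per_file]
  exact a_per_file file
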